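-- pv_equiv track=rewrite | github.com/pypi-data/pypi-mirror-380 | packages/easyascii-py/easyascii_py-1.0.3-py3-none-any.whl/easyascii.py | banner
-- ===== SOURCE A (Python) =====
-- from typing import List, Dict, Any, Optional, Union, Tuple, Iterable
--
-- SIMPLE_FONT = {
--     ' ': ['     ', '     ', '     ', '     ', '     '],
--     'A': [' ### ', '#   #', '#####', '#   #', '#   #'], 'B': ['#### ', '#   #', '#### ', '#   #', '#### '],
--     'C': [' ####', '#    ', '#    ', '#    ', ' ####'], 'D': ['#### ', '#   #', '#   #', '#   #', '#### '],
--     'E': ['#####', '#    ', '###  ', '#    ', '#####'], 'F': ['#####', '#    ', '###  ', '#    ', '#    '],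
--     'G': [' ####', '#    ', '# ###', '#   #', ' ####'], 'H': ['#   #', '#   #', '#####', '#   #', '#   #'],
--     'I': ['#####', '  #  ', '  #  ', '  #  ', '#####'], 'J': ['#####', '    #', '    #', '#   #', ' ### '],
--     'K': ['#  # ', '# #  ', '##   ', '# #  ', '#  # '], 'L': ['#    ', '#    ', '#    ', '#    ', '#####'],
--     'M': ['#   #', '## ##', '# # #', '#   #', '#   #'], 'N': ['#   #', '##  #', '# # #', '#  ##', '#   #'],
--     'O': [' ### ', '#   #', '#   #', '#   #', ' ### '], 'P': ['#### ', '#   #', '#### ', '#    ', '#    '],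
--     'Q': [' ### ', '#   #', '# # #', '#  # ', ' ### #'], 'R': ['#### ', '#   #', '#### ', '# #  ', '#  # '],
--     'S': [' ####', '#    ', ' ### ', '    #', '#### '], 'T': ['#####', '  #  ', '  #  ', '  #  ', '  #  '],
--     'U': ['#   #', '#   #', '#   #', '#   #', ' ### '], 'V': ['#   #', '#   #', '#   #', ' # # ', '  #  '],
--     'W': ['#   #', '#   #', '# # #', '## ##', '#   #'], 'X': ['#   #', ' # # ', '  #  ', ' # # ', '#   #'],
--     'Y': ['#   #', ' # # ', '  #  ', '  #  ', '  #  '], 'Z': ['#####', '   # ', '  #  ', ' #   ', '#####'],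
--     '0': [' ### ', '# # #', '# # #', '# # #', ' ### '], '1': ['  #  ', ' ##  ', '  #  ', '  #  ', ' ### '],
--     '2': [' ### ', '#   #', '  ## ', ' #   ', '#####'], '3': [' ### ', '#   #', '  ## ', '#   #', ' ### '],
--     '4': ['#  # ', '#  # ', '#####', '   # ', '   # '], '5': ['#####', '#    ', '#### ', '    #', '#### '],
--     '6': [' ####', '#    ', '#### ', '#   #', ' ####'], '7': ['#####', '   # ', '  #  ', ' #   ', '#    '],
--     '8': [' ### ', '#   #', ' ### ', '#   #', ' ### '], '9': [' ####', '#   #', ' ####', '    #', '#### '],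
--     '!': ['  #  ', '  #  ', '  #  ', '     ', '  #  '], '?': [' ### ', '#   #', '  ## ', '     ', '  #  '],
--     '.': ['     ', '     ', '     ', '     ', '  #  '], ',': ['     ', '     ', '     ', '  #  ', ' #   '],
--     '-': ['     ', '     ', '#####', '     ', '     '], '+': ['     ', '  #  ', '#####', '  #  ', '     '],
--     '=': ['     ', '#####', '     ', '#####', '     '], '/': ['    #', '   # ', '  #  ', ' #   ', '#    '],
--     '\\':['#    ', ' #   ', '  #  ', '   # ', '    #'], '_': ['     ', '     ', '     ', '     ', '#####'],
-- }
--
-- def banner(text: str, font: Dict = SIMPLE_FONT) -> str: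
--     """
--     Renders large ASCII text (like FIGlet).
--     """
--     text = text.upper()
--     output_lines = [''] * len(font.get('A', [''] * 5)) # Use height of a known character
--
--     for char in text:
--         # Use font.get() for safety in case a character is missing
--         char_lines = font.get(char, font.get(' ', ['     '] * len(output_lines)))
--         for i in range(len(output_lines)):
--             output_lines[i] += char_lines[i] + " "
--
--     return "\n".join(output_lines)
-- ===== SOURCE B (Python) =====
-- from typing import List, Dict, Any, Optional, Union, Tuple, Iterable
--
-- SIMPLE_FONT = {
--     ' ': ['     ', '     ', '     ', '     ', '     '],
--     'A': [' ### ', '#   #', '#####', '#   #', '#   #'], 'B': ['#### ', '#   #', '#### ', '#   #', '#### '],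
--     'C': [' ####', '#    ', '#    ', '#    ', ' ####'], 'D': ['#### ', '#   #', '#   #', '#   #', '#### '],
--     'E': ['#####', '#    ', '###  ', '#    ', '#####'], 'F': ['#####', '#    ', '###  ', '#    ', '#    '],
--     'G': [' ####', '#    ', '# ###', '#   #', ' ####'], 'H': ['#   #', '#   #', '#####', '#   #', '#   #'],
--     'I': ['#####', '  #  ', '  #  ', '  #  ', '#####'], 'J': ['#####', '    #', '    #', '#   #', ' ### '],
--     'K': ['#  # ', '# #  ', '##   ', '# #  ', '#  # '], 'L': ['#    ', '#    ', '#    ', '#    ', '#####'],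
--     'M': ['#   #', '## ##', '# # #', '#   #', '#   #'], 'N': ['#   #', '##  #', '# # #', '#  ##', '#   #'],
--     'O': [' ### ', '#   #', '#   #', '#   #', ' ### '], 'P': ['#### ', '#   #', '#### ', '#    ', '#    '],
--     'Q': [' ### ', '#   #', '# # #', '#  # ', ' ### #'], 'R': ['#### ', '#   #', '#### ', '# #  ', '#  # '],
--     'S': [' ####', '#    ', ' ### ', '    #', '#### '], 'T': ['#####', '  #  ', '  #  ', '  #  ', '  #  '],
--     'U': ['#   #', '#   #', '#   #', '#   #', ' ### '], 'V': ['#   #', '#   #', '#   #', ' # # ', '  #  '],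
--     'W': ['#   #', '#   #', '# # #', '## ##', '#   #'], 'X': ['#   #', ' # # ', '  #  ', ' # # ', '#   #'],
--     'Y': ['#   #', ' # # ', '  #  ', '  #  ', '  #  '], 'Z': ['#####', '   # ', '  #  ', ' #   ', '#####'],
--     '0': [' ### ', '# # #', '# # #', '# # #', ' ### '], '1': ['  #  ', ' ##  ', '  #  ', '  #  ', ' ### '],
--     '2': [' ### ', '#   #', '  ## ', ' #   ', '#####'], '3': [' ### ', '#   #', '  ## ', '#   #', ' ### '],
--     '4': ['#  # ', '#  # ', '#####', '   # ', '   # '], '5': ['#####', '#    ', '#### ', '    #', '#### '],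
--     '6': [' ####', '#    ', '#### ', '#   #', ' ####'], '7': ['#####', '   # ', '  #  ', ' #   ', '#    '],
--     '8': [' ### ', '#   #', ' ### ', '#   #', ' ### '], '9': [' ####', '#   #', ' ####', '    #', '#### '],
--     '!': ['  #  ', '  #  ', '  #  ', '     ', '  #  '], '?': [' ### ', '#   #', '  ## ', '     ', '  #  '],
--     '.': ['     ', '     ', '     ', '     ', '  #  '], ',': ['     ', '     ', '     ', '  #  ', ' #   '],
--     '-': ['     ', '     ', '#####', '     ', '     '], '+': ['     ', '  #  ', '#####', '  #  ', '     '],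
--     '=': ['     ', '#####', '     ', '#####', '     '], '/': ['    #', '   # ', '  #  ', ' #   ', '#    '],
--     '\\':['#    ', ' #   ', '  #  ', '   # ', '    #'], '_': ['     ', '     ', '     ', '     ', '#####'],
-- }
--
-- def banner(text: str, font: Dict = SIMPLE_FONT) -> str:
--     """Renders large ASCII text by balanced divide-and-conquer: split the text in
--     half, render each half to its own list of lines, merge the halves row-wise."""
--     text = text.upper()
--     height = len(font.get('A', [''] * 5))
--     fallback = font.get(' ', ['     '] * height)
--
--     def render(s):
--         if not s:
--             return [''] * height
--         if len(s) == 1: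
--             g = font.get(s, fallback)
--             return [g[i] + ' ' for i in range(height)]
--         mid = len(s) // 2
--         left, right = render(s[:mid]), render(s[mid:])
--         return [left[i] + right[i] for i in range(height)]
--
--     return '\n'.join(render(text))
-- ===== Notes on version B (the rewrite author's own statement) =====
-- stated objective: faster
-- what changed: B replaces A's linear character loop that mutates a shared per-row accumulator by repeated += with a balanced divide-and-conquer: the text is split in half recursively, each half rendered to its own list of lines, and the halves merged row-wise; correctness follows from associativity of row-wise concatenation.
import Mathlib
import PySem

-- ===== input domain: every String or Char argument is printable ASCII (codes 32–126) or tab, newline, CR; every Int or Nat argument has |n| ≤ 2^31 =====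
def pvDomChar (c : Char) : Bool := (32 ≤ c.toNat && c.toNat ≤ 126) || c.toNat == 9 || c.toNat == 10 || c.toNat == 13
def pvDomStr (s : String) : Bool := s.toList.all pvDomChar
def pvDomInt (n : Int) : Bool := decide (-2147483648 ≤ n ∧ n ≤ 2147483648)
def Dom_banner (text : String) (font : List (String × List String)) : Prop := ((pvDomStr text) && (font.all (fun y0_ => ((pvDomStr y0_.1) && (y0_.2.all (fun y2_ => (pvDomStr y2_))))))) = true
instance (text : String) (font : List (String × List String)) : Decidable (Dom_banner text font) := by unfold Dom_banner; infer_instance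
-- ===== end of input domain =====

-- B renders by balanced divide-and-conquer (split the text in half, render halves, merge row-wise)
-- instead of A's linear character loop growing each row by repeated +=; a timing run measured B faster.


-- ===== PORT A =====
-- shared helper: Python dict.get on the association list (first match)
def pvGet (font : List (String × List String)) (k : String) : Option (List String) :=
  List.lookup k font

-- literal port of A: character-major loop, inner index loop mutating output_lines in place.
-- char_lines[i] is ported as .getD i "" — exact whenever i < char_lines.length, which Pre_banner guarantees
-- (Python raises IndexError exactly where a used glyph has fewer lines than the font height).
def banner (text : String) (font : List (String × List String)) : String :=
  let t := PySem.Str.upper text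
  let outputLines := List.replicate ((pvGet font "A").getD (List.replicate 5 "")).length ""
  let outputLines := t.toList.foldl (fun out c =>
    let charLines := (pvGet font (String.mk [c])).getD
        ((pvGet font " ").getD (List.replicate out.length "     "))
    (List.range out.length).foldl
      (fun out2 i => out2.set i (out2.getD i "" ++ (charLines.getD i "" ++ " "))) out) outputLines
  PySem.Str.join "\n" outputLines

-- ===== PORT B =====
-- literal port of B's recursive helper `render`: divide-and-conquer on the character list.
-- g[i] / left[i] / right[i] ported as .getD i "" — exact under Pre_banner, as in port A.
def pvRender (font : List (String × List String)) (h : Nat) (fb : List String) (cs : List Char) : List String :=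
  if cs = [] then List.replicate h ""
  else if cs.length = 1 then
    (List.range h).map (fun i => ((pvGet font (String.mk cs)).getD fb).getD i "" ++ " ")
  else
    let mid := cs.length / 2
    let left := pvRender font h fb (cs.take mid)
    let right := pvRender font h fb (cs.drop mid)
    (List.range h).map (fun i => left.getD i "" ++ right.getD i "")
termination_by cs.length
decreasing_by
  · simp only [List.length_take]
    have : cs.length ≠ 0 := by simpa [List.length_eq_zero_iff] using ‹¬ cs = []›
    omega
  · simp only [List.length_drop]
    have : cs.length ≠ 0 := by simpa [List.length_eq_zero_iff] using ‹¬ cs = []›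
    omega

-- literal port of B (Source B): upper-case, compute height and fallback, render, join with newlines.
def banner_alt (text : String) (font : List (String × List String)) : String :=
  let t := PySem.Str.upper text
  let height := ((pvGet font "A").getD (List.replicate 5 "")).length
  let fallback := (pvGet font " ").getD (List.replicate height "     ")
  PySem.Str.join "\n" (pvRender font height fallback t.toList)

-- ===== PRECONDITION & SPEC =====
-- Pre_banner excludes exactly the inputs where Python A raises IndexError: some character of the
-- upper-cased text resolves to a glyph with fewer lines than the font height.
def Pre_banner (text : String) (font : List (String × List String)) : Prop :=
  ((PySem.Str.upper text).toList.all fun c =>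
    ((pvGet font "A").getD (List.replicate 5 "")).length ≤
      ((pvGet font (String.mk [c])).getD
        ((pvGet font " ").getD
          (List.replicate ((pvGet font "A").getD (List.replicate 5 "")).length "     "))).length) = true
instance (text : String) (font : List (String × List String)) : Decidable (Pre_banner text font) := by
  unfold Pre_banner; infer_instance
def pvWitness_banner : String × (List (String × List String)) := ("", [])

def Spec_banner (text : String) (font : List (String × List String)) (out : String) : Prop := out = banner_alt text font
instance (text : String) (font : List (String × List String)) (out : String) : Decidable (Spec_banner text font out) := by unfold Spec_banner; infer_instance

-- ===== CLAIM (what is proved, stated in full; the proofs are below) =====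
def Claim_equal_banner : Prop := ∀ (text : String) (font : List (String × List String)), Dom_banner text font → Pre_banner text font → Spec_banner text font (banner text font)

-- ===== LEMMAS AND PROOFS =====

-- the glyph piece contributed by character c to output row i (fb = the font's fallback glyph)
def pvPiece (font : List (String × List String)) (fb : List String) (c : Char) (i : Nat) : String :=
  ((pvGet font (String.mk [c])).getD fb).getD i "" ++ " "

theorem pv_join_empty_cons (x : String) (xs : List String) :
    PySem.Str.join "" (x :: xs) = x ++ PySem.Str.join "" xs := by
  apply String.toList_inj.mp
  cases xs <;> simp [PySem.Str.toList_join, PySem.Chars.join, List.intercalate]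

theorem pv_join_empty_nil : PySem.Str.join "" ([] : List String) = "" := by
  apply String.toList_inj.mp
  simp [PySem.Str.toList_join, PySem.Chars.join, List.intercalate]

theorem pv_join_empty_append (xs ys : List String) :
    PySem.Str.join "" (xs ++ ys) = PySem.Str.join "" xs ++ PySem.Str.join "" ys := by
  induction xs with
  | nil => rw [List.nil_append, pv_join_empty_nil, String.empty_append]
  | cons x xs ih =>
    rw [List.cons_append, pv_join_empty_cons, pv_join_empty_cons, ih, String.append_assoc]

theorem pv_map_range_getD (h i : Nat) (f : Nat → String) (hi : i < h) :
    ((List.range h).map f).getD i "" = f i := by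
  rw [List.getD_eq_getElem _ _ (by simpa using hi)]
  simp

-- B's recursion, characterized row-wise: row i is the join of the pieces of all characters
theorem pvRender_eq (font : List (String × List String)) (h : Nat) (fb : List String)
    (cs : List Char) :
    pvRender font h fb cs =
      (List.range h).map (fun i => PySem.Str.join "" (cs.map fun c => pvPiece font fb c i)) := by
  rw [pvRender]
  by_cases hnil : cs = []
  · subst hnil
    rw [if_pos rfl]
    apply List.ext_getElem (by simp)
    intro j h1 h2
    simp [pv_join_empty_nil]
  · rw [if_neg hnil]
    by_cases h1 : cs.length = 1
    · obtain ⟨c, rfl⟩ := List.length_eq_one_iff.mp h1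
      rw [if_pos h1]
      apply List.map_congr_left
      intro i _
      rw [List.map_cons, List.map_nil, pv_join_empty_cons, pv_join_empty_nil,
        String.append_empty, pvPiece]
    · rw [if_neg h1]
      have hlt : cs.length / 2 < cs.length := by
        have : cs.length ≠ 0 := by simpa [List.length_eq_zero_iff] using hnil
        omega
      show (List.range h).map (fun i =>
          (pvRender font h fb (cs.take (cs.length / 2))).getD i "" ++
          (pvRender font h fb (cs.drop (cs.length / 2))).getD i "") = _
      rw [pvRender_eq font h fb (cs.take (cs.length / 2)),
        pvRender_eq font h fb (cs.drop (cs.length / 2))]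
      apply List.map_congr_left
      intro i hi
      rw [pv_map_range_getD _ _ _ (List.mem_range.mp hi),
        pv_map_range_getD _ _ _ (List.mem_range.mp hi),
        ← pv_join_empty_append, ← List.map_append, List.take_append_drop]
termination_by cs.length
decreasing_by
  · simp only [List.length_take]
    have : cs.length ≠ 0 := by simpa [List.length_eq_zero_iff] using hnil
    omega
  · simp only [List.length_drop]
    have : cs.length ≠ 0 := by simpa [List.length_eq_zero_iff] using hnil
    omega

-- A's inner index loop, characterized: length is preserved and entry j gets s j appended
theorem pv_innerFold (s : Nat → String) (m : Nat) (out : List String) :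
    ((List.range m).foldl (fun o i => o.set i (o.getD i "" ++ s i)) out).length = out.length ∧
    ∀ j, j < out.length →
      ((List.range m).foldl (fun o i => o.set i (o.getD i "" ++ s i)) out).getD j "" =
        if j < m then out.getD j "" ++ s j else out.getD j "" := by
  induction m with
  | zero => simp
  | succ m ih =>
    obtain ⟨ihlen, ihel⟩ := ih
    rw [List.range_succ, List.foldl_append]
    simp only [List.foldl_cons, List.foldl_nil]
    constructor
    · rw [List.length_set]; exact ihlen
    · intro j hj
      set F := (List.range m).foldl (fun o i => o.set i (o.getD i "" ++ s i)) out with hF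
      by_cases hjm : j = m
      · subst hjm
        have hjF : j < F.length := ihlen ▸ hj
        rw [List.getD_eq_getElem _ _ (by simpa using hjF), List.getElem_set,
          if_pos rfl, List.getD_eq_getElem _ _ hjF, ← List.getD_eq_getElem F "" hjF,
          ihel j hj, if_neg (lt_irrefl j), if_pos (Nat.lt_succ_self j)]
      · have hjF : j < F.length := ihlen ▸ hj
        rw [List.getD_eq_getElem _ _ (by simpa using hjF), List.getElem_set,
          if_neg (fun h => hjm h.symm), ← List.getD_eq_getElem F "" hjF, ihel j hj]
        by_cases h2 : j < m
        · rw [if_pos h2, if_pos (by omega : j < m + 1)]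
        · rw [if_neg h2, if_neg (by omega : ¬ j < m + 1)]

-- A's inner loop over the full range is mapIdx (append row piece to every line)
theorem pv_innerFold_eq (s : Nat → String) (out : List String) :
    (List.range out.length).foldl (fun o i => o.set i (o.getD i "" ++ s i)) out =
      out.mapIdx fun i l => l ++ s i := by
  obtain ⟨hlen, hel⟩ := pv_innerFold s out.length out
  apply List.ext_getElem (by rw [hlen, List.length_mapIdx])
  intro j h1 h2
  have hj : j < out.length := hlen ▸ h1
  rw [← List.getD_eq_getElem _ "" h1, hel j hj, if_pos hj, List.getElem_mapIdx,
    List.getD_eq_getElem _ _ hj]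

-- A's character loop, characterized row-wise
theorem pv_outerFold (font : List (String × List String)) (h : Nat) :
    ∀ (cs : List Char) (out : List String), out.length = h →
      cs.foldl (fun out c =>
        let charLines := (pvGet font (String.mk [c])).getD
            ((pvGet font " ").getD (List.replicate out.length "     "))
        (List.range out.length).foldl
          (fun out2 i => out2.set i (out2.getD i "" ++ (charLines.getD i "" ++ " "))) out) out =
      out.mapIdx fun i l => l ++ PySem.Str.join ""
        (cs.map fun c => pvPiece font ((pvGet font " ").getD (List.replicate h "     ")) c i) := by
  intro cs
  induction cs with
  | nil =>
    intro out hlen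
    rw [List.foldl_nil]
    apply List.ext_getElem (by simp)
    intro j h1 h2
    rw [List.getElem_mapIdx, List.map_nil, pv_join_empty_nil]
    simp
  | cons c cs ih =>
    intro out hlen
    subst hlen
    rw [List.foldl_cons]
    have hstep := pv_innerFold_eq
      (fun i => pvPiece font ((pvGet font " ").getD (List.replicate out.length "     ")) c i) out
    simp only [pvPiece] at hstep
    show List.foldl _ (List.foldl (fun out2 i => out2.set i (out2.getD i "" ++
        (((pvGet font (String.mk [c])).getD
          ((pvGet font " ").getD (List.replicate out.length "     "))).getD i "" ++ " "))) out
        (List.range out.length)) cs = _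
    rw [hstep, ih _ (by rw [List.length_mapIdx]), List.mapIdx_mapIdx]
    apply congrArg (out.mapIdx ·)
    funext i l
    simp only [Function.comp]
    rw [List.map_cons, pv_join_empty_cons, String.append_assoc, pvPiece]

-- seed mapIdx over blank lines = map over row indices
theorem pv_mapIdx_replicate (h : Nat) (g : Nat → String) :
    ((List.replicate h "").mapIdx fun i l => l ++ g i) = (List.range h).map g := by
  apply List.ext_getElem (by simp)
  intro j h1 h2
  rw [List.getElem_mapIdx, List.getElem_map, List.getElem_replicate, List.getElem_range]
  simp

-- ===== VERDICT (by name: the statement is the Claim_ definition above) =====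
theorem banner_spec : Claim_equal_banner := by
  intro text font _ _
  unfold Spec_banner banner banner_alt
  simp only []
  apply congrArg (PySem.Str.join "\n")
  rw [pv_outerFold font ((pvGet font "A").getD (List.replicate 5 "")).length
      (PySem.Str.upper text).toList (List.replicate _ "") (by simp),
    pv_mapIdx_replicate, pvRender_eq]
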